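-- pv_equiv track=rewrite | github.com/samarthraj/Question_Solve | Feb_23_2025/Q2_230225.py | max_zero_switch
-- ===== SOURCE A (Python) =====
-- def max_zero_switch(arr):
--
--     sum = 0
--     max_sum = 0
--     for i in range(0, len(arr)):
--         if arr[i] == 1:
--             sum += 1
--             max_sum = max(max_sum, sum)
--         else:
--             sum = 0
--
--     return max_sum
-- ===== SOURCE B (Python) =====
-- def max_zero_switch(arr):
--     # Longest run of 1s = largest gap between consecutive non-1 positions
--     # (with sentinels just before the start and just past the end).
--     bounds = [-1] + [i for i, x in enumerate(arr) if x != 1] + [len(arr)]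
--     return max(b - a - 1 for a, b in zip(bounds, bounds[1:]))
-- ===== Notes on version B (the rewrite author's own statement) =====
-- stated objective: alternative
-- what changed: B replaces A's single loop interleaving a run counter with a running maximum by a segment-boundary computation: it collects the positions of all non-1 elements (with sentinels -1 and len(arr)) and returns the largest gap between consecutive boundaries.
import Mathlib
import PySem

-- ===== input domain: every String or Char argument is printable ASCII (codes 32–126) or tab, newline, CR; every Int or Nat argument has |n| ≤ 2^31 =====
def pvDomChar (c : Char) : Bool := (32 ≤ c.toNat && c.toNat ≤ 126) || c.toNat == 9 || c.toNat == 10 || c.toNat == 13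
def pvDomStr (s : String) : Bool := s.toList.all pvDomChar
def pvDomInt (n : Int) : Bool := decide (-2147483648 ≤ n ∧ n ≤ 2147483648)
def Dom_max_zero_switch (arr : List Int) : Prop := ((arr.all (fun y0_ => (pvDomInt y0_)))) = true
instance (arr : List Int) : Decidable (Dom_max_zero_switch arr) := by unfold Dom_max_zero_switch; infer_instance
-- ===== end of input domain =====

-- B replaces A's interleaved counter/running-max loop by a gap computation over the
-- positions of the non-1 elements (segment boundaries with sentinels); alternative
-- decomposition, same O(n) cost.

-- ===== PORT A =====
-- literal port of A: index loop over range(0, len(arr)) with state (sum, max_sum)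
def max_zero_switch (arr : List Int) : Int :=
  (List.foldl
    (fun (sm : Int × Int) (i : Int) =>
      if PySem.List.pyGetD arr i 0 = 1 then (sm.1 + 1, max sm.2 (sm.1 + 1)) else (0, sm.2))
    (0, 0) (PySem.List.pyRange 0 arr.length 1)).2

-- ===== PORT B =====
-- literal port of B: boundary positions of non-1 elements with sentinels, then max gap
def max_zero_switch_alt (arr : List Int) : Int :=
  let bounds : List Int :=
    [-1] ++ ((PySem.List.enumerate arr).filter (fun p => p.2 != 1)).map (fun p => p.1)
      ++ [(arr.length : Int)]
  let gaps : List Int :=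
    (bounds.zip (PySem.List.slice bounds (some 1) none)).map (fun p => p.2 - p.1 - 1)
  -- max(gen): bounds always has ≥ 2 elements, so gaps ≠ [] and max? never returns none
  (PySem.List.max? gaps (fun y => y)).getD 0

-- ===== PRECONDITION & SPEC =====
def Spec_max_zero_switch (arr : List Int) (out : Int) : Prop := out = max_zero_switch_alt arr
instance (arr : List Int) (out : Int) : Decidable (Spec_max_zero_switch arr out) := by unfold Spec_max_zero_switch; infer_instance

-- ===== CLAIM (what is proved, stated in full; the proofs are below) =====
def Claim_equal_max_zero_switch : Prop := ∀ (arr : List Int), Dom_max_zero_switch arr → Spec_max_zero_switch arr (max_zero_switch arr)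

-- ===== LEMMAS AND PROOFS =====

-- A's loop body as a function of the current element
def pvStep (sm : Int × Int) (a : Int) : Int × Int :=
  if a = 1 then (sm.1 + 1, max sm.2 (sm.1 + 1)) else (0, sm.2)

-- structural description of A's running max: pvAux s l = best run ending inside l,
-- given a current run of length s entering l (only runs that get extended count)
def pvAux (s : Int) : List Int → Int
  | [] => 0
  | a :: t => if a = 1 then max (s + 1) (pvAux (s + 1) t) else pvAux 0 t

-- length of the leading run of 1s
def pvRun1 (l : List Int) : Nat := (l.takeWhile (· == 1)).length

-- positions (starting at s) of the non-1 elements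
def pvPosns (arr : List Int) (s : Int) : List Int :=
  ((PySem.List.enumerate arr s).filter (fun p => p.2 != 1)).map (fun p => p.1)

-- max gap of the boundary list prev :: ps ++ [n]
def pvGm (prev : Int) : List Int → Int → Int
  | [], n => n - prev - 1
  | p :: ps, n => max (p - prev - 1) (pvGm p ps n)

theorem pvAux_nonneg (l : List Int) : ∀ s, 0 ≤ pvAux s l := by
  induction l with
  | nil => intro s; simp [pvAux]
  | cons a t ih =>
    intro s
    by_cases h : a = 1 <;> simp [pvAux, h]
    · exact Or.inr (ih (s + 1))
    · exact ih 0

theorem pvFoldA (l : List Int) : ∀ s m : Int, 0 ≤ m →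
    (l.foldl pvStep (s, m)).2 = max m (pvAux s l) := by
  induction l with
  | nil => intro s m hm; simp [pvAux]; omega
  | cons a t ih =>
    intro s m hm
    by_cases h : a = 1
    · subst h
      have e1 : pvStep (s, m) 1 = (s + 1, max m (s + 1)) := by simp [pvStep]
      have e2 : pvAux s (1 :: t) = max (s + 1) (pvAux (s + 1) t) := by simp [pvAux]
      rw [List.foldl_cons, e1, e2, ih (s + 1) (max m (s + 1)) (by omega)]
      omega
    · have e1 : pvStep (s, m) a = (0, m) := by simp [pvStep, h]
      have e2 : pvAux s (a :: t) = pvAux 0 t := by simp [pvAux, h]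
      rw [List.foldl_cons, e1, e2]
      exact ih 0 m hm

theorem pvRun1_nil : pvRun1 [] = 0 := rfl
theorem pvRun1_cons (a : Int) (t : List Int) :
    pvRun1 (a :: t) = if a = 1 then pvRun1 t + 1 else 0 := by
  by_cases h : a = 1 <;> simp [pvRun1, h]

theorem pvRun1_le (l : List Int) : pvRun1 l ≤ l.length := by
  induction l with
  | nil => simp [pvRun1_nil]
  | cons a t ih => rw [pvRun1_cons]; split <;> simp <;> omega

-- A's value satisfies the segment recurrence
theorem pvAux_rec (l : List Int) : ∀ s : Int, 0 ≤ s →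
    max s (pvAux s l) =
      max (s + (pvRun1 l : Int)) (max 0 (pvAux 0 (l.drop (pvRun1 l + 1)))) := by
  induction l with
  | nil => intro s hs; simp [pvAux, pvRun1_nil]
  | cons a t ih =>
    intro s hs
    by_cases h : a = 1
    · subst h
      have hr : pvRun1 (1 :: t) = pvRun1 t + 1 := by rw [pvRun1_cons]; simp
      rw [hr]
      have h2 : pvAux s (1 :: t) = max (s + 1) (pvAux (s + 1) t) := by
        simp [pvAux]
      have h1 : max s (pvAux s (1 :: t)) = max (s + 1) (pvAux (s + 1) t) := by
        rw [h2]; omega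
      rw [h1, ih (s + 1) (by omega)]
      have hd : (1 :: t).drop (pvRun1 t + 1 + 1) = t.drop (pvRun1 t + 1) := by
        simp [List.drop_succ_cons]
      rw [hd]
      push_cast
      congr 1
      omega
    · rw [pvRun1_cons, if_neg h]
      simp only [pvAux, if_neg h, List.drop_succ_cons, Nat.zero_add, List.drop_zero]
      have := pvAux_nonneg t 0
      push_cast
      omega

theorem pvPosns_nil (s : Int) : pvPosns [] s = [] := by simp [pvPosns, PySem.List.enumerate]

theorem pvPosns_cons (x : Int) (t : List Int) (s : Int) :
    pvPosns (x :: t) s = if x = 1 then pvPosns t (s + 1) else s :: pvPosns t (s + 1) := by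
  by_cases h : x = 1 <;> simp [pvPosns, h]

theorem pvPosns_shift (l : List Int) : ∀ s c : Int,
    pvPosns l (s + c) = (pvPosns l s).map (· + c) := by
  induction l with
  | nil => intro s c; simp [pvPosns_nil]
  | cons x t ih =>
    intro s c
    rw [pvPosns_cons, pvPosns_cons]
    by_cases h : x = 1
    · simp only [if_pos h]
      have : s + c + 1 = (s + 1) + c := by ring
      rw [this, ih]
    · simp only [if_neg h, List.map_cons]
      have : s + c + 1 = (s + 1) + c := by ring
      rw [this, ih]

theorem pvGm_shift (ps : List Int) : ∀ prev n c : Int,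
    pvGm (prev + c) (ps.map (· + c)) (n + c) = pvGm prev ps n := by
  induction ps with
  | nil => intro prev n c; simp [pvGm]
  | cons p t ih =>
    intro prev n c
    simp only [List.map_cons, pvGm]
    rw [ih]
    congr 1
    ring

theorem pvPosns_run (l : List Int) : ∀ s : Int,
    pvPosns l s =
      if pvRun1 l = l.length then []
      else (s + (pvRun1 l : Int)) ::
        pvPosns (l.drop (pvRun1 l + 1)) (s + (pvRun1 l : Int) + 1) := by
  induction l with
  | nil => intro s; simp [pvPosns_nil, pvRun1_nil]
  | cons a t ih =>
    intro s
    by_cases h : a = 1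
    · subst h
      rw [pvPosns_cons, if_pos rfl, pvRun1_cons, if_pos rfl, ih (s + 1)]
      by_cases ht : pvRun1 t = t.length
      · simp [ht]
      · have hne : ¬ (pvRun1 t + 1 = t.length + 1) := by omega
        simp only [if_neg ht, List.length_cons, if_neg hne, List.drop_succ_cons]
        push_cast
        have e : s + 1 + (pvRun1 t : Int) = s + ((pvRun1 t : Int) + 1) := by ring
        rw [e]
    · rw [pvPosns_cons, if_neg h, pvRun1_cons, if_neg h]
      have : ¬ (0 = (a :: t).length) := by simp
      rw [if_neg this]
      simp

theorem pvFoldMax_gm (ps : List Int) : ∀ prev n m : Int,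
    ((((prev :: (ps ++ [n])).zip (ps ++ [n])).map (fun p => p.2 - p.1 - 1)).foldl max m)
      = max m (pvGm prev ps n) := by
  induction ps with
  | nil => intro prev n m; simp [pvGm]
  | cons p t ih =>
    intro prev n m
    simp only [List.cons_append, List.zip_cons_cons, List.map_cons, List.foldl_cons, pvGm]
    rw [ih p n (max m (p - prev - 1))]
    omega

theorem pvAlt_gm (arr : List Int) :
    max_zero_switch_alt arr = pvGm (-1) (pvPosns arr 0) (arr.length : Int) := by
  unfold max_zero_switch_alt
  have hps : ((PySem.List.enumerate arr).filter (fun p => p.2 != 1)).map (fun p => p.1)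
      = pvPosns arr 0 := rfl
  simp only [hps]
  set ps := pvPosns arr 0 with hdef
  have hb : ([-1] ++ ps ++ [(arr.length : Int)]) = (-1) :: (ps ++ [(arr.length : Int)]) := by
    simp
  rw [hb]
  have hsl : PySem.List.slice ((-1) :: (ps ++ [(arr.length : Int)])) (some 1) none
      = ps ++ [(arr.length : Int)] := by
    rw [PySem.List.slice_from _ (by norm_num)]
    simp
  rw [hsl]
  -- unfold max?: the gap list is nonempty, its head seeds the fold
  cases hps' : ps with
  | nil =>
    simp only [List.nil_append, List.zip_cons_cons, List.map_cons,
      PySem.List.max?_id_cons, Option.getD_some]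
    simp [pvGm]
  | cons p t =>
    simp only [List.cons_append, List.zip_cons_cons, List.map_cons, PySem.List.max?_id_cons]
    rw [pvFoldMax_gm t p (arr.length : Int) (p - (-1) - 1)]
    simp [pvGm]

-- B's gap maximum equals A's running maximum (strong induction on length)
theorem pvGm_eq_aux : ∀ (n : Nat) (l : List Int), l.length ≤ n →
    pvGm (-1) (pvPosns l 0) (l.length : Int) = max 0 (pvAux 0 l) := by
  intro n
  induction n with
  | zero =>
    intro l hl
    have : l = [] := List.eq_nil_of_length_eq_zero (by omega)
    subst this
    simp [pvPosns_nil, pvGm, pvAux]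
  | succ n ih =>
    intro l hl
    rcases List.eq_nil_or_concat l with rfl | _
    · simp [pvPosns_nil, pvGm, pvAux]
    · set k := pvRun1 l with hk
      have hkle := pvRun1_le l
      rw [pvPosns_run l 0]
      by_cases hall : pvRun1 l = l.length
      · rw [if_pos hall]
        have hdrop : l.drop (pvRun1 l + 1) = [] := by
          apply List.drop_eq_nil_of_le; omega
        have := pvAux_rec l 0 (le_refl 0)
        rw [hdrop] at this
        simp only [pvAux] at this
        simp only [pvGm]
        have h0 : max (0:Int) (pvAux 0 l) = max (0 + (pvRun1 l : Int)) (max 0 0) := this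
        rw [h0, hall]
        simp
      · rw [if_neg hall]
        have hklt : pvRun1 l < l.length := lt_of_le_of_ne hkle hall
        set rest := l.drop (pvRun1 l + 1) with hrest
        have hlen : rest.length = l.length - (pvRun1 l + 1) := by
          rw [hrest, List.length_drop]
        have hshift : pvPosns rest (0 + (pvRun1 l : Int) + 1)
            = (pvPosns rest 0).map (· + ((pvRun1 l : Int) + 1)) := by
          have : (0:Int) + (pvRun1 l : Int) + 1 = 0 + ((pvRun1 l : Int) + 1) := by ring
          rw [this, pvPosns_shift]
        rw [hshift]
        simp only [pvGm]
        have hgm : pvGm (0 + (pvRun1 l : Int))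
            ((pvPosns rest 0).map (· + ((pvRun1 l : Int) + 1))) (l.length : Int)
            = pvGm (-1) (pvPosns rest 0) (rest.length : Int) := by
          have h1 : (0 : Int) + (pvRun1 l : Int) = (-1) + ((pvRun1 l : Int) + 1) := by ring
          have h2 : (l.length : Int) = (rest.length : Int) + ((pvRun1 l : Int) + 1) := by
            rw [hlen]; push_cast [Nat.cast_sub (by omega : pvRun1 l + 1 ≤ l.length)]; ring_nf
          rw [h1, h2, pvGm_shift]
        rw [hgm, ih rest (by omega)]
        have := pvAux_rec l 0 (le_refl 0)
        rw [← hrest] at this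
        have hnn := pvAux_nonneg l 0
        omega

-- ===== VERDICT (by name: the statement is the Claim_ definition above) =====
theorem max_zero_switch_spec : Claim_equal_max_zero_switch := by
  intro arr _
  unfold Spec_max_zero_switch
  unfold max_zero_switch
  rw [show (fun (sm : Int × Int) (i : Int) =>
      if PySem.List.pyGetD arr i 0 = 1 then (sm.1 + 1, max sm.2 (sm.1 + 1)) else (0, sm.2))
    = (fun sm i => pvStep sm (PySem.List.pyGetD arr i 0)) from rfl]
  rw [PySem.List.foldl_pyRange_zero_pyGetD' arr 0 pvStep (0, 0)]
  rw [pvFoldA arr 0 0 (le_refl 0)]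
  rw [pvAlt_gm arr, pvGm_eq_aux arr.length arr (le_refl _)]
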